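-- pv_equiv track=rewrite | github.com/XerafinaTaleSedrin/BlueSquirrelEtsyTool | EtsyAnalyzer/automation/etsy_listing_generator.py | _get_materials_for_products
-- ===== SOURCE A (Python) =====
-- from typing import List, Dict, Optional, Any
--
-- def _get_materials_for_products(products: List[str]) -> List[str]:
--     """Get materials list for products"""
--
--     materials = []
--
--     for product in products:
--         if 't-shirt' in product.lower() or 'tee' in product.lower():
--             materials.extend(["Cotton", "Polyester"])
--         elif 'hoodie' in product.lower():
--             materials.extend(["Cotton", "Polyester Blend"])
--         elif 'mug' in product.lower():
--             materials.append("Ceramic")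
--         elif 'tote' in product.lower():
--             materials.append("Canvas")
--
--     # Remove duplicates while preserving order
--     return list(dict.fromkeys(materials))
-- ===== SOURCE B (Python) =====
-- def _mats_for_name(name):
--     if 't-shirt' in name or 'tee' in name:
--         return ["Cotton", "Polyester"]
--     if 'hoodie' in name:
--         return ["Cotton", "Polyester Blend"]
--     if 'mug' in name:
--         return ["Ceramic"]
--     if 'tote' in name:
--         return ["Canvas"]
--     return []
--
-- def _get_materials_for_products(products):
--     """Get materials list for products"""
--     # Build the answer BACK TO FRONT: walk the products right-to-left, at each step
--     # prepending the product's material block and filtering it out of the suffix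
--     # result -- no global accumulator, no seen-set, no dict.fromkeys pass.
--     result = []
--     for p in reversed(products):
--         block = _mats_for_name(p.lower())
--         result = block + [m for m in result if m not in block]
--     return result
-- ===== Notes on version B (the rewrite author's own statement) =====
-- stated objective: alternative
-- what changed: Instead of A's left-to-right accumulation into one growing list followed by a dict.fromkeys dedup pass, B builds the answer back-to-front: it walks the products right-to-left and at each step prepends the product's material block and filters that block out of the already-built suffix result, so no global material list and no final dedup pass exist.
import Mathlib
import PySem

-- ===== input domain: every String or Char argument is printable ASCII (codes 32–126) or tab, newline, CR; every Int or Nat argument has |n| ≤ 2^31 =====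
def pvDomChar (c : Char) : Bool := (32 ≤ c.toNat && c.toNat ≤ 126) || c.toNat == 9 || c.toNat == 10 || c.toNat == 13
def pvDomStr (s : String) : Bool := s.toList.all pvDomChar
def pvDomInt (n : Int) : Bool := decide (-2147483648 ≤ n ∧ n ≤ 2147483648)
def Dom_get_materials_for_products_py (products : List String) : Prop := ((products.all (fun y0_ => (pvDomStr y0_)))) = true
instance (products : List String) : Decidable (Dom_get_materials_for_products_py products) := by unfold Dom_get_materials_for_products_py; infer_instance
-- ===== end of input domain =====

-- B builds the answer back-to-front (right-to-left walk, prepend block, filter suffix)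
-- instead of A's left-to-right accumulation plus final dict.fromkeys pass (objective: alternative; same cost).

-- ===== PORT A =====
def get_materials_for_products_py (products : List String) : List String :=
  let materials := products.foldl (fun materials product =>
    if PySem.Str.isIn "t-shirt" (PySem.Str.lower product) || PySem.Str.isIn "tee" (PySem.Str.lower product) then
      materials ++ ["Cotton", "Polyester"]
    else if PySem.Str.isIn "hoodie" (PySem.Str.lower product) then
      materials ++ ["Cotton", "Polyester Blend"]
    else if PySem.Str.isIn "mug" (PySem.Str.lower product) then
      materials ++ ["Ceramic"]
    else if PySem.Str.isIn "tote" (PySem.Str.lower product) then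
      materials ++ ["Canvas"]
    else materials) []
  PySem.List.dedup materials

-- ===== PORT B =====
-- Source B's helper _mats_for_name
def matsForName (name : String) : List String :=
  if PySem.Str.isIn "t-shirt" name || PySem.Str.isIn "tee" name then
    ["Cotton", "Polyester"]
  else if PySem.Str.isIn "hoodie" name then
    ["Cotton", "Polyester Blend"]
  else if PySem.Str.isIn "mug" name then
    ["Ceramic"]
  else if PySem.Str.isIn "tote" name then
    ["Canvas"]
  else []

-- Source B's loop 'for p in reversed(products): result = block + [m for m in result if m not in block]'
-- is exactly a right fold over products.
def get_materials_for_products_py_alt (products : List String) : List String :=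
  products.foldr (fun p result =>
    let block := matsForName (PySem.Str.lower p)
    block ++ result.filter (fun m => !(block.contains m))) []

-- ===== PRECONDITION & SPEC =====
def Spec_get_materials_for_products_py (products : List String) (out : List String) : Prop := out = get_materials_for_products_py_alt products
instance (products : List String) (out : List String) : Decidable (Spec_get_materials_for_products_py products out) := by unfold Spec_get_materials_for_products_py; infer_instance

-- ===== CLAIM =====
def Claim_equal_get_materials_for_products_py : Prop := ∀ (products : List String), Dom_get_materials_for_products_py products → Spec_get_materials_for_products_py products (get_materials_for_products_py products)

-- ===== LEMMAS AND PROOFS =====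

-- A's per-product contribution, factored out of its fold step
def matsA (product : String) : List String := matsForName (PySem.Str.lower product)

theorem stepA_eq (m : List String) (p : String) :
    (if PySem.Str.isIn "t-shirt" (PySem.Str.lower p) || PySem.Str.isIn "tee" (PySem.Str.lower p) then
      m ++ ["Cotton", "Polyester"]
    else if PySem.Str.isIn "hoodie" (PySem.Str.lower p) then
      m ++ ["Cotton", "Polyester Blend"]
    else if PySem.Str.isIn "mug" (PySem.Str.lower p) then
      m ++ ["Ceramic"]
    else if PySem.Str.isIn "tote" (PySem.Str.lower p) then
      m ++ ["Canvas"]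
    else m) = m ++ matsA p := by
  simp only [matsA, matsForName]; split_ifs <;> simp

-- A's fold is plain concatenation of the per-product blocks
theorem foldA_eq (l : List String) (m : List String) :
    l.foldl (fun materials product =>
      if PySem.Str.isIn "t-shirt" (PySem.Str.lower product) || PySem.Str.isIn "tee" (PySem.Str.lower product) then
        materials ++ ["Cotton", "Polyester"]
      else if PySem.Str.isIn "hoodie" (PySem.Str.lower product) then
        materials ++ ["Cotton", "Polyester Blend"]
      else if PySem.Str.isIn "mug" (PySem.Str.lower product) then
        materials ++ ["Ceramic"]
      else if PySem.Str.isIn "tote" (PySem.Str.lower product) then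
        materials ++ ["Canvas"]
      else materials) m = m ++ l.flatMap matsA := by
  induction l generalizing m with
  | nil => simp
  | cons p l ih => rw [List.foldl_cons, stepA_eq, ih, List.flatMap_cons, List.append_assoc]

-- Feeding more elements into a Set accumulator appends exactly the new ones
theorem foldl_add_eq (ys acc : List String) :
    ys.foldl PySem.Set.add acc
      = acc ++ (PySem.List.dedup ys).filter (fun m => !(acc.contains m)) := by
  induction ys generalizing acc with
  | nil => simp [PySem.List.dedup, PySem.Set.ofList]
  | cons y ys ih =>
    have hdd : PySem.List.dedup (y :: ys)
        = [y] ++ (PySem.List.dedup ys).filter (fun m => !(List.contains [y] m)) := by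
      show List.foldl PySem.Set.add PySem.Set.empty (y :: ys) = _
      rw [List.foldl_cons]
      have h0 : PySem.Set.add PySem.Set.empty y = [y] := rfl
      rw [h0, ih [y]]
    rw [List.foldl_cons, hdd]
    by_cases h : y ∈ acc
    · have hadd : PySem.Set.add acc y = acc := by
        simp [PySem.Set.add, PySem.Set.contains, List.contains_eq_mem, h]
      rw [hadd, ih]
      simp only [List.filter_append, List.filter_filter]
      have h1 : List.filter (fun m => !acc.contains m) [y] = [] := by
        simp [List.contains_eq_mem, h]
      rw [h1, List.nil_append]
      congr 1
      apply List.filter_congr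
      intro m _
      simp only [List.contains_eq_mem, List.mem_singleton]
      by_cases hm : m ∈ acc
      · simp [hm]
      · have hne : ¬ m = y := fun he => hm (he ▸ h)
        simp [hm, hne]
    · have hadd : PySem.Set.add acc y = acc ++ [y] := by
        simp [PySem.Set.add, PySem.Set.contains, List.contains_eq_mem, h]
      rw [hadd, ih]
      simp only [List.filter_append, List.filter_filter, List.append_assoc]
      congr 1
      have h1 : List.filter (fun m => !acc.contains m) [y] = [y] := by
        simp [List.contains_eq_mem, h]
      rw [h1]
      congr 1
      apply List.filter_congr
      intro m _
      simp only [List.contains_eq_mem, List.mem_append, List.mem_singleton]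
      by_cases hm : m ∈ acc <;> by_cases hy : m = y <;> simp [hm, hy]

-- each possible block is duplicate-free, so dedup leaves it unchanged
theorem dedup_matsA (p : String) : PySem.List.dedup (matsA p) = matsA p := by
  simp only [matsA, matsForName]
  split_ifs <;> decide

-- the heart: dedup of the concatenated blocks = B's back-to-front merge
theorem main_lemma (l : List String) :
    PySem.List.dedup (l.flatMap matsA) = get_materials_for_products_py_alt l := by
  induction l with
  | nil => rfl
  | cons p l ih =>
    simp only [List.flatMap_cons, get_materials_for_products_py_alt, List.foldr_cons]
    have h1 : PySem.List.dedup (matsA p ++ l.flatMap matsA)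
        = (l.flatMap matsA).foldl PySem.Set.add (PySem.List.dedup (matsA p)) := by
      simp only [PySem.List.dedup, PySem.Set.ofList, List.foldl_append]
    rw [h1, dedup_matsA, foldl_add_eq, ih]
    rfl

-- ===== VERDICT =====
theorem get_materials_for_products_py_spec : Claim_equal_get_materials_for_products_py := by
  intro products _
  unfold Spec_get_materials_for_products_py get_materials_for_products_py
  rw [foldA_eq, List.nil_append, main_lemma]
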